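-- pv_equiv track=rewrite | github.com/Roverlucas/genai-reproducibility-protocol | analysis/analyze_expanded.py | identify_condition
-- ===== SOURCE A (Python) =====
-- def identify_condition(run_data: dict) -> str:
--     """Identify experimental condition from run data."""
--     run_id = run_data.get("run_id", "")
--     parts = run_id.split("_")
--     for i, part in enumerate(parts):
--         if part.startswith("C1") or part.startswith("C2") or part.startswith("C3"):
--             cond_parts = [part]
--             for j in range(i + 1, len(parts)):
--                 if parts[j].startswith("rep"):
--                     break
--                 cond_parts.append(parts[j])
--             return "_".join(cond_parts)
--     return "unknown"
-- ===== SOURCE B (Python) =====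
-- def identify_condition(run_data: dict) -> str:
--     """Identify experimental condition from run data."""
--     res, keep = "unknown", []
--     for part in reversed(run_data.get("run_id", "").split("_")):
--         keep = [] if part.startswith("rep") else [part] + keep
--         if part[:2] in ("C1", "C2", "C3"):
--             res = "_".join(keep)
--     return res
-- ===== Notes on version B (the rewrite author's own statement) =====
-- stated objective: alternative
-- what changed: Replaces the find-first-match scan with a quadratic indexed inner collection loop by a single right-to-left fold that maintains the 'tokens until the next rep' accumulator, so the inner scan disappears.
import Mathlib
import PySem

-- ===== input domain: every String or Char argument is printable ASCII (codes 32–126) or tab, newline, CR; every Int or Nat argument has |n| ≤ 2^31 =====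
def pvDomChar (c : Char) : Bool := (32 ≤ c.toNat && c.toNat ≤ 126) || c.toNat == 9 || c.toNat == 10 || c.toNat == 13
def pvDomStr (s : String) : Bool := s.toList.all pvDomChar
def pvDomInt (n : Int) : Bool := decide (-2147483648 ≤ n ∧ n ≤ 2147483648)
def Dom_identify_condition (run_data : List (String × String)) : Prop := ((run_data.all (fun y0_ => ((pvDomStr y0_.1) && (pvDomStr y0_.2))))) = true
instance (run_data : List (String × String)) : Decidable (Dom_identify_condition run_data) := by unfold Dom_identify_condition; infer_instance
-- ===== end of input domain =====

-- ===== PORT A =====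
-- B replaces A's nested indexed inner scan by one right-to-left fold; equal return value on all inputs.
def aInner (parts : List String) (js : List Int) (cond_parts : List String) : List String :=
  match js with
  | [] => cond_parts
  | j :: rest =>
    let pj := PySem.List.pyGetD parts j ""
    if PySem.Str.startswith pj "rep" then cond_parts
    else aInner parts rest (cond_parts ++ [pj])

def aOuter (parts : List String) : List (Int × String) → String
  | [] => "unknown"
  | (i, part) :: rest =>
    if PySem.Str.startswith part "C1" || PySem.Str.startswith part "C2" || PySem.Str.startswith part "C3" then
      PySem.Str.join "_" (aInner parts (PySem.List.pyRange (i + 1) (parts.length : Int) 1) [part])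
    else aOuter parts rest

def identify_condition (run_data : List (String × String)) : String :=
  let run_id := (PySem.Dict.ofList run_data).getD "run_id" ""
  let parts := (PySem.Str.split? run_id "_").getD []
  aOuter parts (PySem.List.enumerate parts)

-- ===== PORT B =====
def bStep (st : String × List String) (part : String) : String × List String :=
  let keep := if PySem.Str.startswith part "rep" then [] else part :: st.2
  let res := if PySem.Str.slice part (some 0) (some 2) ∈ (["C1", "C2", "C3"] : List String)
             then PySem.Str.join "_" keep else st.1
  (res, keep)

def identify_condition_alt (run_data : List (String × String)) : String :=
  let parts := (PySem.Str.split? ((PySem.Dict.ofList run_data).getD "run_id" "") "_").getD []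
  (parts.reverse.foldl bStep ("unknown", [])).1

-- ===== PRECONDITION & SPEC =====
def Spec_identify_condition (run_data : List (String × String)) (out : String) : Prop := out = identify_condition_alt run_data
instance (run_data : List (String × String)) (out : String) : Decidable (Spec_identify_condition run_data out) := by unfold Spec_identify_condition; infer_instance

-- ===== CLAIM (what is proved, stated in full; the proofs are below) =====
def Claim_equal_identify_condition : Prop := ∀ (run_data : List (String × String)), Dom_identify_condition run_data → Spec_identify_condition run_data (identify_condition run_data)

-- ===== LEMMAS AND PROOFS =====

def notRep (p : String) : Bool := !PySem.Str.startswith p "rep"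

def matchA (p : String) : Bool :=
  PySem.Str.startswith p "C1" || PySem.Str.startswith p "C2" || PySem.Str.startswith p "C3"

def aRes : List String → String
  | [] => "unknown"
  | p :: t => if matchA p then PySem.Str.join "_" (p :: t.takeWhile notRep) else aRes t

theorem slice2_eq_startswith (p : String) (c1 c2 : Char) :
    (PySem.Str.slice p (some 0) (some 2) = String.ofList [c1, c2]) ↔ PySem.Str.startswith p (String.ofList [c1, c2]) = true := by
  rw [← String.toList_inj]
  simp [PySem.Chars.startswith_iff, PySem.List.slice_to, List.prefix_iff_eq_take]
  constructor <;> intro h <;> simp_all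

theorem match_eq (p : String) :
    (PySem.Str.slice p (some 0) (some 2) ∈ (["C1", "C2", "C3"] : List String)) ↔ matchA p = true := by
  have e1 : ("C1" : String) = String.ofList ['C', '1'] := rfl
  have e2 : ("C2" : String) = String.ofList ['C', '2'] := rfl
  have e3 : ("C3" : String) = String.ofList ['C', '3'] := rfl
  simp only [List.mem_cons, List.not_mem_nil, or_false, matchA, Bool.or_eq_true, e1, e2, e3,
    slice2_eq_startswith]
  tauto

theorem matchA_not_rep (p : String) (h : matchA p = true) :
    PySem.Str.startswith p "rep" = false := by
  rw [← Bool.not_eq_true, PySem.Str.startswith_eq, PySem.Chars.startswith_iff]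
  simp only [matchA, Bool.or_eq_true, PySem.Str.startswith_eq, PySem.Chars.startswith_iff] at h
  intro hrep
  obtain ⟨t, ht⟩ := hrep
  rcases h with (⟨t', ht'⟩ | ⟨t', ht'⟩) | ⟨t', ht'⟩ <;>
    · rw [← ht'] at ht
      simp at ht

theorem aInner_eq (parts : List String) (k : Nat) (acc : List String) :
    aInner parts (PySem.List.pyRange (k : Int) (parts.length : Int) 1) acc
      = acc ++ (parts.drop k).takeWhile notRep := by
  induction hn : parts.length - k generalizing k acc with
  | zero =>
    rw [PySem.List.pyRange_one_eq_nil (by omega), List.drop_eq_nil_of_le (by omega)]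
    simp [aInner]
  | succ n ih =>
    have hk : k < parts.length := by omega
    rw [PySem.List.pyRange_one_cons (by exact_mod_cast hk)]
    rw [List.drop_eq_getElem_cons hk]
    simp only [aInner, PySem.List.pyGetD_natCast, List.getD_eq_getElem?_getD,
      List.getElem?_eq_getElem hk, Option.getD_some]
    have hcast : ((k : Int) + 1) = (((k + 1 : Nat)) : Int) := by push_cast; ring
    by_cases hs : PySem.Str.startswith parts[k] "rep" = true
    · have hs' : PySem.Chars.startswith parts[k].toList ['r', 'e', 'p'] = true := by simpa using hs
      simp [hs', notRep]
    · rw [Bool.not_eq_true] at hs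
      have hs' : PySem.Chars.startswith parts[k].toList ['r', 'e', 'p'] = false := by simpa using hs
      simp only [List.takeWhile_cons, notRep, hs, Bool.not_false, if_true, if_false,
        Bool.false_eq_true]
      rw [hcast, ih (k + 1) (acc ++ [parts[k]]) (by omega)]
      simp

theorem aOuter_eq (parts : List String) (k : Nat) :
    aOuter parts (PySem.List.enumerate (parts.drop k) (k : Int)) = aRes (parts.drop k) := by
  induction hn : parts.length - k generalizing k with
  | zero =>
    rw [List.drop_eq_nil_of_le (by omega)]
    simp [aOuter, aRes, PySem.List.enumerate]
  | succ n ih =>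
    have hk : k < parts.length := by omega
    rw [List.drop_eq_getElem_cons hk, PySem.List.enumerate_cons, aOuter, aRes]
    have hcast : ((k : Int) + 1) = (((k + 1 : Nat)) : Int) := by push_cast; ring
    by_cases hm : matchA parts[k] = true
    · rw [if_pos (by simpa [matchA] using hm), if_pos hm]
      rw [hcast, aInner_eq parts (k + 1) [parts[k]]]
      simp
    · rw [Bool.not_eq_true] at hm
      rw [if_neg (by simpa [matchA] using hm), if_neg (by simp [hm])]
      rw [hcast, ih (k + 1) (by omega)]

theorem bFold_eq (parts : List String) :
    List.foldr (fun p st => bStep st p) (("unknown" : String), ([] : List String)) parts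
      = (aRes parts, parts.takeWhile notRep) := by
  induction parts with
  | nil => simp [aRes]
  | cons p t ih =>
    rw [List.foldr_cons, ih]
    simp only [bStep]
    by_cases hmem : PySem.Str.slice p (some 0) (some 2) ∈ (["C1", "C2", "C3"] : List String)
    · have hm : matchA p = true := (match_eq p).mp hmem
      have hs : PySem.Str.startswith p "rep" = false := matchA_not_rep p hm
      have hs' : PySem.Chars.startswith p.toList ['r', 'e', 'p'] = false := by simpa using hs
      simp [hmem, hm, hs', aRes, notRep]
    · have hm : matchA p = false := by
        cases h : matchA p
        · rfl
        · exact absurd ((match_eq p).mpr h) hmem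
      by_cases hs : PySem.Str.startswith p "rep" = true
      · have hs' : PySem.Chars.startswith p.toList ['r', 'e', 'p'] = true := by simpa using hs
        simp [hmem, hm, hs', aRes, notRep]
      · rw [Bool.not_eq_true] at hs
        have hs' : PySem.Chars.startswith p.toList ['r', 'e', 'p'] = false := by simpa using hs
        simp [hmem, hm, hs', aRes, notRep]

-- ===== VERDICT (by name: the statement is the Claim_ definition above) =====
theorem identify_condition_spec : Claim_equal_identify_condition := by
  intro rd _
  unfold Spec_identify_condition identify_condition identify_condition_alt
  show aOuter _ (PySem.List.enumerate _) = (List.foldl bStep ("unknown", []) (List.reverse _)).1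
  have h := aOuter_eq ((PySem.Str.split? ((PySem.Dict.ofList rd).getD "run_id" "") "_").getD []) 0
  simp only [List.drop_zero, Nat.cast_zero] at h
  rw [List.foldl_reverse, bFold_eq]
  exact h
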